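-- pv_equiv track=rewrite | github.com/haliphax/twitter-acrobot | acrobot.py | validate_acronym
-- ===== SOURCE A (Python) =====
-- def validate_acronym(acronym, submission):
--     """ Validate a submission against the acronym. """
--     chunks = submission.split(' ')
--     acronym_len = len(acronym)
--
--     # needs to use the right number of words
--     if len(chunks) != acronym_len:
--         return False
--
--     # first letter of each word needs to match the acronym
--     for i in range(acronym_len):
--         if chunks[i][0].upper() != acronym[i]:
--             return False
--
--     return True
-- ===== SOURCE B (Python) =====
-- def validate_acronym(acronym, submission):
--     """ Validate a submission against the acronym. """
--     i = 0             # acronym letters matched so far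
--     expecting = True  # the next character begins a new word
--     for ch in submission:
--         if expecting:
--             # ch is the first character of the current word
--             if i == len(acronym) or ch.upper() != acronym[i]:
--                 return False
--             i += 1
--         expecting = ch == ' '
--     # every acronym letter consumed and no further word still pending
--     return i == len(acronym) and not expecting
-- ===== Notes on version B (the rewrite author's own statement) =====
-- stated objective: alternative
-- what changed: Replaces split-into-word-list + length guard + indexed first-letter loop by a single character-level scan of the submission with an acronym cursor and a word-boundary flag; no word list is built and the word count is checked by the same pass.
-- outside the precondition, e.g. on validate_acronym('AB', 'x '): A returns False, B returns False; on validate_acronym('AB', 'a '): A raises IndexError, B returns False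
import Mathlib
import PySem

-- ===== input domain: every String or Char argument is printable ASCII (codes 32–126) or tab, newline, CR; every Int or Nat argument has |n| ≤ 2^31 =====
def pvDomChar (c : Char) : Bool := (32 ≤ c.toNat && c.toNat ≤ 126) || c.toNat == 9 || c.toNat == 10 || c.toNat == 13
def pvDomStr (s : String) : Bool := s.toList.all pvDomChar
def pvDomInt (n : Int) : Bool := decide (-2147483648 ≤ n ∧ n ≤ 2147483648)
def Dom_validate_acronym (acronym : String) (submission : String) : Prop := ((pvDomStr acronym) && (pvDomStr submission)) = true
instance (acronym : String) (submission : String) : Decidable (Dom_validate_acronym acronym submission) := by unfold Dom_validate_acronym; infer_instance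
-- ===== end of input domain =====

-- B replaces A's split-into-words + length guard + indexed first-letter loop by a
-- single character-level scan of the submission with an acronym cursor and a
-- word-boundary flag (no word list is ever built): a different decomposition.


-- ===== PORT A =====
-- loop 'for i in range(acronym_len)': structural recursion over the chunk list and
-- the acronym letters in step (called only with equal lengths).  chunks[i][0]
-- raises IndexError on an empty word; the port returns false there — such inputs
-- are excluded by Pre_.
def pvLoopA : List String → List Char → Bool
  | _, [] => true
  | [], _ :: _ => false          -- unreachable: lists have equal length
  | c :: cs, a :: as =>
      match c.toList with
      | [] => false              -- Python raises IndexError here (outside Pre_)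
      | ch :: _ => if PySem.Chars.upperChar ch ≠ a then false else pvLoopA cs as

def validate_acronym (acronym : String) (submission : String) : Bool :=
  let chunks := (PySem.Str.split? submission " ").getD []
  if chunks.length ≠ acronym.toList.length then false
  else pvLoopA chunks acronym.toList

-- ===== PORT B =====
-- the 'for ch in submission' loop of Source B: state = (acronym cursor i, expecting
-- flag); 'acronym[i]' is reached only under 'i ≠ len' (Python's short-circuit
-- 'or'), so 'getD i' with an arbitrary default is exact.
def pvScanB (letters : List Char) : List Char → Nat → Bool → Bool
  | [], i, expecting => i == letters.length && !expecting
  | ch :: rest, i, expecting =>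
      if expecting then
        if i == letters.length || !(PySem.Chars.upperChar ch == letters.getD i ' ') then false
        else pvScanB letters rest (i + 1) (ch == ' ')
      else pvScanB letters rest i (ch == ' ')

def validate_acronym_alt (acronym : String) (submission : String) : Bool :=
  pvScanB acronym.toList submission.toList 0 true

-- ===== PRECONDITION & SPEC =====
-- Pre_ excludes submissions containing an empty word (consecutive, leading or
-- trailing spaces) when the word count equals the acronym length: there A raises
-- IndexError at the empty word unless an earlier letter mismatch already returned
-- False — and on those returning inputs B returns the same False.
def Pre_validate_acronym (acronym : String) (submission : String) : Prop :=
  ((PySem.Str.split? submission " ").getD []).length = acronym.toList.length →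
    ∀ c ∈ (PySem.Str.split? submission " ").getD [], c.toList ≠ []

instance (acronym : String) (submission : String) : Decidable (Pre_validate_acronym acronym submission) := by
  unfold Pre_validate_acronym; infer_instance

def pvWitness_validate_acronym : String × String := ("AB", "ab bc")

def Spec_validate_acronym (acronym : String) (submission : String) (out : Bool) : Prop := out = validate_acronym_alt acronym submission
instance (acronym : String) (submission : String) (out : Bool) : Decidable (Spec_validate_acronym acronym submission out) := by unfold Spec_validate_acronym; infer_instance

-- ===== CLAIM (what is proved, stated in full; the proofs are below) =====
def Claim_equal_validate_acronym : Prop := ∀ (acronym : String) (submission : String), Dom_validate_acronym acronym submission → Pre_validate_acronym acronym submission → Spec_validate_acronym acronym submission (validate_acronym acronym submission)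

-- ===== LEMMAS AND PROOFS =====

-- specification-level splitter on ' ' (proof-only; the ports do not use it)
def pvWords : List Char → List (List Char)
  | [] => [[]]
  | c :: t => if c = ' ' then [] :: pvWords t
              else (c :: (pvWords t).headI) :: (pvWords t).tail

theorem pvWords_ne_nil (s : List Char) : pvWords s ≠ [] := by
  cases s with
  | nil => simp [pvWords]
  | cons c t => by_cases h : c = ' ' <;> simp [pvWords, h]

-- pvLoopA only reads the chunks' character lists
def pvLoopA' : List (List Char) → List Char → Bool
  | _, [] => true
  | [], _ :: _ => false
  | c :: cs, a :: as =>
      match c with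
      | [] => false
      | ch :: _ => if PySem.Chars.upperChar ch ≠ a then false else pvLoopA' cs as

theorem pvLoopA_eq_pvLoopA' (cs : List String) : ∀ as_ : List Char,
    pvLoopA cs as_ = pvLoopA' (cs.map String.toList) as_ := by
  induction cs with
  | nil => intro as_; cases as_ <;> rfl
  | cons c cs ih =>
    intro as_
    cases as_ with
    | nil => rfl
    | cons a as_ =>
      cases hcl : c.toList with
      | nil => simp [pvLoopA, pvLoopA', hcl]
      | cons ch rest =>
        by_cases h : PySem.Chars.upperChar ch = a <;>
          simp [pvLoopA, pvLoopA', hcl, h, ih]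

theorem splitOn_go_space (fuel : Nat) : ∀ (l cur : List Char) (acc : List (List Char))
    (w : List Char) (ws : List (List Char)), l.length < fuel → pvWords l = w :: ws →
    PySem.Chars.splitOn.go [' '] fuel l cur acc = acc.reverse ++ ((cur.reverse ++ w) :: ws) := by
  induction fuel with
  | zero => intro l cur acc w ws h _; omega
  | succ f ih =>
    intro l cur acc w ws h hw
    cases l with
    | nil =>
      simp only [pvWords] at hw
      injection hw with hw1 hw2
      simp [PySem.Chars.splitOn.go, ← hw1, ← hw2]
    | cons c rest =>
      by_cases hc : c = ' '
      · subst hc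
        simp only [pvWords, if_true] at hw
        injection hw with hw1 hw2
        cases hws : pvWords rest with
        | nil => exact absurd hws (pvWords_ne_nil rest)
        | cons w' ws' =>
          have hgo := ih rest [] (cur.reverse :: acc) w' ws'
            (by simp only [List.length_cons] at h; omega) hws
          rw [hws] at hw2
          simp [PySem.Chars.splitOn.go, List.isPrefixOf, hgo, ← hw1, ← hw2]
      · cases hws : pvWords rest with
        | nil => exact absurd hws (pvWords_ne_nil rest)
        | cons w' ws' =>
          simp only [pvWords, if_neg hc, hws] at hw
          injection hw with hw1 hw2
          simp only [List.headI, List.tail_cons] at hw1 hw2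
          have hgo := ih rest (c :: cur) acc w' ws'
            (by simp only [List.length_cons] at h; omega) hws
          have hc' : ¬ (' ' = c) := fun hx => hc hx.symm
          simp [PySem.Chars.splitOn.go, List.isPrefixOf, hc', hgo, ← hw1, ← hw2]

theorem splitOn_eq_pvWords (s : List Char) :
    PySem.Chars.splitOn s [' '] = pvWords s := by
  cases hws : pvWords s with
  | nil => exact absurd hws (pvWords_ne_nil s)
  | cons w ws =>
    have := splitOn_go_space (s.length + 1) s [] [] w ws (by omega) hws
    simpa [PySem.Chars.splitOn] using this

-- one-step unfoldings of B's loop (proof-only)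
theorem pvScanB_cons_true (letters : List Char) (ch : Char) (rest : List Char) (i : Nat) :
    pvScanB letters (ch :: rest) i true =
      if (i == letters.length || !(PySem.Chars.upperChar ch == letters.getD i ' ')) = true
      then false else pvScanB letters rest (i + 1) (ch == ' ') := rfl

theorem pvScanB_cons_false (letters : List Char) (ch : Char) (rest : List Char) (i : Nat) :
    pvScanB letters (ch :: rest) i false = pvScanB letters rest i (ch == ' ') := rfl

-- the scan of B computes A's guarded loop over the words of the remaining input
theorem pvScanB_eq (letters : List Char) : ∀ (s : List Char) (i : Nat) (expecting : Bool),
    (expecting = true →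
      ((pvWords s).length + i = letters.length → ∀ w ∈ pvWords s, w ≠ [])) →
    (expecting = false →
      ((pvWords s).length + i = letters.length + 1 → ∀ w ∈ (pvWords s).tail, w ≠ [])) →
    pvScanB letters s i expecting =
      if expecting then
        (if (pvWords s).length + i ≠ letters.length then false
         else pvLoopA' (pvWords s) (letters.drop i))
      else
        (if (pvWords s).length + i ≠ letters.length + 1 then false
         else pvLoopA' (pvWords s).tail (letters.drop i)) := by
  intro s
  induction s with
  | nil =>
    intro i expecting ht hf
    cases expecting with
    | true =>
      have hne : (pvWords ([] : List Char)).length + i ≠ letters.length := fun hEq =>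
        (ht rfl hEq [] (by simp [pvWords])) rfl
      rw [if_pos rfl, if_pos hne]
      simp [pvScanB]
    | false =>
      rw [if_neg (show ¬ (false = true) by simp)]
      by_cases hi : i = letters.length
      · rw [if_neg (show ¬ ((pvWords ([] : List Char)).length + i ≠ letters.length + 1) from
            by simp [pvWords]; omega)]
        subst hi
        simp [pvScanB, pvWords, List.drop_length, pvLoopA']
      · rw [if_pos (show (pvWords ([] : List Char)).length + i ≠ letters.length + 1 from
            by simp [pvWords]; omega)]
        simp [pvScanB, hi]
  | cons c t ih =>
    intro i expecting ht hf
    by_cases hc : c = ' '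
    · subst hc
      have hlen : (pvWords (' ' :: t)).length = (pvWords t).length + 1 := by simp [pvWords]
      have hsp : ((' ' : Char) == ' ') = true := rfl
      cases expecting with
      | true =>
        have hne : (pvWords (' ' :: t)).length + i ≠ letters.length := fun hEq =>
          (ht rfl hEq [] (by simp [pvWords])) rfl
        rw [if_pos rfl, if_pos hne, pvScanB_cons_true]
        by_cases hg : (i == letters.length || !(PySem.Chars.upperChar ' ' == letters.getD i ' ')) = true
        · rw [if_pos hg]
        · rw [if_neg hg, hsp]
          have hne' : (pvWords t).length + (i + 1) ≠ letters.length := by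
            rw [hlen] at hne; omega
          rw [ih (i + 1) true (fun _ hEq => absurd hEq hne') (by simp)]
          rw [if_pos rfl, if_pos hne']
      | false =>
        have htail : (pvWords (' ' :: t)).tail = pvWords t := by simp [pvWords]
        rw [if_neg (show ¬ (false = true) by simp), pvScanB_cons_false, hsp]
        rw [ih i true
            (fun _ hEq => by simpa [htail] using hf rfl (by rw [hlen]; omega)) (by simp)]
        rw [if_pos rfl, htail]
        by_cases hcond : (pvWords t).length + i = letters.length
        · rw [if_neg (show ¬ ((pvWords t).length + i ≠ letters.length) from by omega),
              if_neg (show ¬ ((pvWords (' ' :: t)).length + i ≠ letters.length + 1) from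
                by rw [hlen]; omega)]
        · rw [if_pos (show (pvWords t).length + i ≠ letters.length from hcond),
              if_pos (show (pvWords (' ' :: t)).length + i ≠ letters.length + 1 from
                by rw [hlen]; omega)]
    · cases hws : pvWords t with
      | nil => exact absurd hws (pvWords_ne_nil t)
      | cons wt wst =>
        have hcons : pvWords (c :: t) = (c :: wt) :: wst := by
          simp [pvWords, hc, hws]
        have hbc : (c == ' ') = false := by simp [hc]
        have hLt : (pvWords t).length = wst.length + 1 := by simp [hws]
        have htail2 : (pvWords t).tail = wst := by simp [hws]
        cases expecting with
        | true =>
          rw [if_pos rfl, hcons]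
          rw [hcons] at ht
          rw [pvScanB_cons_true, hbc]
          by_cases hlen : wst.length + 1 + i = letters.length
          · have hilt : i < letters.length := by omega
            have hdrop : List.drop i letters = letters[i] :: List.drop (i + 1) letters :=
              List.drop_eq_getElem_cons hilt
            have hgetD : letters.getD i ' ' = letters[i] := List.getD_eq_getElem letters ' ' hilt
            rw [if_neg (show ¬ (((c :: wt) :: wst).length + i ≠ letters.length) from
                by simp only [List.length_cons]; omega), hdrop]
            by_cases hmatch : PySem.Chars.upperChar c = letters[i]
            · have hguard : (i == letters.length || !(PySem.Chars.upperChar c == letters.getD i ' ')) = false := by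
                rw [hgetD]
                simp [hmatch]
                omega
              rw [hguard, if_neg (show ¬ (false = true) by simp)]
              have hall : ∀ w ∈ wst, w ≠ [] := fun w hw =>
                ht rfl (by simp only [List.length_cons]; omega) w (List.mem_cons_of_mem _ hw)
              rw [ih (i + 1) false (by simp) (fun _ _ => htail2 ▸ hall)]
              rw [if_neg (show ¬ (false = true) by simp),
                  if_neg (show ¬ ((pvWords t).length + (i + 1) ≠ letters.length + 1) from
                    by rw [hLt]; omega), htail2]
              simp [pvLoopA', hmatch]
            · have hguard : (i == letters.length || !(PySem.Chars.upperChar c == letters.getD i ' ')) = true := by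
                rw [hgetD]
                simp [hmatch]
              rw [hguard, if_pos rfl]
              simp [pvLoopA', hmatch]
          · rw [if_pos (show ((c :: wt) :: wst).length + i ≠ letters.length from
                by simp only [List.length_cons]; omega)]
            by_cases hg : (i == letters.length || !(PySem.Chars.upperChar c == letters.getD i ' ')) = true
            · rw [if_pos hg]
            · rw [if_neg hg]
              rw [ih (i + 1) false (by simp)
                  (fun _ hEq => absurd hEq (by rw [hLt]; omega))]
              rw [if_neg (show ¬ (false = true) by simp),
                  if_pos (show (pvWords t).length + (i + 1) ≠ letters.length + 1 from
                    by rw [hLt]; omega)]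
        | false =>
          rw [if_neg (show ¬ (false = true) by simp), hcons]
          rw [hcons] at hf
          rw [pvScanB_cons_false, hbc]
          rw [ih i false (by simp)
              (fun _ hEq => fun w hw => hf rfl
                (by simp only [List.length_cons]; rw [hLt] at hEq; omega) w
                (by rw [htail2] at hw; simpa using hw))]
          rw [if_neg (show ¬ (false = true) by simp), htail2]
          by_cases hcond : wst.length + 1 + i = letters.length + 1
          · rw [if_neg (show ¬ ((pvWords t).length + i ≠ letters.length + 1) from
                by rw [hLt]; omega),
              if_neg (show ¬ (((c :: wt) :: wst).length + i ≠ letters.length + 1) from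
                by simp only [List.length_cons]; omega), List.tail_cons]
          · rw [if_pos (show (pvWords t).length + i ≠ letters.length + 1 from
                by rw [hLt]; omega),
              if_pos (show ((c :: wt) :: wst).length + i ≠ letters.length + 1 from
                by simp only [List.length_cons]; omega)]

-- ===== VERDICT (by name: the statement is the Claim_ definition above) =====
theorem validate_acronym_spec : Claim_equal_validate_acronym := by
  intro acronym submission _ hpre
  unfold Spec_validate_acronym validate_acronym validate_acronym_alt
  show (if ((PySem.Str.split? submission " ").getD []).length ≠ acronym.toList.length then false
        else pvLoopA ((PySem.Str.split? submission " ").getD []) acronym.toList)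
      = pvScanB acronym.toList submission.toList 0 true
  have h2 : PySem.Chars.split? submission.toList [' '] = some (pvWords submission.toList) := by
    simp [PySem.Chars.split?, splitOn_eq_pvWords]
  have hsplit : ((PySem.Str.split? submission " ").getD []).map String.toList
      = pvWords submission.toList := by
    have h := PySem.Str.split?_map submission " "
    rw [show (" " : String).toList = [' '] from rfl, h2] at h
    cases hx : PySem.Str.split? submission " " with
    | none => rw [hx] at h; simp at h
    | some cs => rw [hx] at h; simp at h; simp [h]
  have hlen : ((PySem.Str.split? submission " ").getD []).length
      = (pvWords submission.toList).length := by
    rw [← hsplit, List.length_map]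
  have hprew : (pvWords submission.toList).length = acronym.toList.length →
      ∀ w ∈ pvWords submission.toList, w ≠ [] := by
    intro hEq w hw
    rw [← hsplit] at hw
    obtain ⟨cstr, hcs, rfl⟩ := List.mem_map.1 hw
    exact hpre (by omega) cstr hcs
  rw [pvScanB_eq acronym.toList submission.toList 0 true
      (fun _ h => hprew (by simpa using h)) (by simp)]
  rw [if_pos rfl]
  simp only [Nat.add_zero, List.drop_zero]
  by_cases hq : (pvWords submission.toList).length = acronym.toList.length
  · rw [if_neg (show ¬ (((PySem.Str.split? submission " ").getD []).length ≠ acronym.toList.length)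
        from by omega),
      if_neg (show ¬ ((pvWords submission.toList).length ≠ acronym.toList.length) from by omega)]
    rw [pvLoopA_eq_pvLoopA', hsplit]
  · rw [if_pos (show ((PySem.Str.split? submission " ").getD []).length ≠ acronym.toList.length
        from by omega),
      if_pos (show (pvWords submission.toList).length ≠ acronym.toList.length from hq)]
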